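-- pv_equiv track=rewrite | github.com/Oka117/TAAC2026Baseline | build_feature_engineering_dataset.py | _append_feature_specs
-- ===== SOURCE A (Python) =====
-- from typing import Any, DefaultDict, Dict, Iterable, List, Optional, Sequence, Tuple
--
-- def _append_feature_specs(
--     specs: Sequence[Sequence[int]],
--     additions: Sequence[Sequence[int]],
-- ) -> List[List[int]]:
--     by_fid = {int(row[0]): list(map(int, row)) for row in specs}
--     for row in additions:
--         by_fid[int(row[0])] = list(map(int, row))
--     return [by_fid[fid] for fid in sorted(by_fid)]
-- ===== SOURCE B (Python) =====
-- def _append_feature_specs(specs, additions):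
--     ordered = sorted(list(specs) + list(additions), key=lambda row: int(row[0]))
--     out = []
--     pending = None
--     for row in ordered:
--         row = list(map(int, row))
--         if pending is not None and pending[0] != row[0]:
--             out.append(pending)
--         pending = row
--     if pending is not None:
--         out.append(pending)
--     return out
-- ===== Notes on version B (the rewrite author's own statement) =====
-- stated objective: alternative
-- what changed: Replaces the fid-keyed dict (last write wins) plus sorted-key lookup pass with a single stable sort of specs+additions by fid followed by one linear sweep that keeps the last row of each equal-fid run.
import Mathlib
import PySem

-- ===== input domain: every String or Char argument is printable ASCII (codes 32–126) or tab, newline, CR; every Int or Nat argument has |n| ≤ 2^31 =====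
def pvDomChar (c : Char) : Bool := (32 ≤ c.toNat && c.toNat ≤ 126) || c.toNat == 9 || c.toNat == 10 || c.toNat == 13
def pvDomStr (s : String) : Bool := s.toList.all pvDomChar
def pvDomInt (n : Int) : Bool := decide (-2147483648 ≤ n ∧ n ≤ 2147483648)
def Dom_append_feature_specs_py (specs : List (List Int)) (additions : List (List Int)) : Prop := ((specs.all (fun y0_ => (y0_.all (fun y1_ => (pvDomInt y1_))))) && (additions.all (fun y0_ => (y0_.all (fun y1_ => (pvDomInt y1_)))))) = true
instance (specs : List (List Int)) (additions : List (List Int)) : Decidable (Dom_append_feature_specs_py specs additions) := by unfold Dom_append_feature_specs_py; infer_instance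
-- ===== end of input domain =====

-- B replaces A's fid-keyed dict + sorted-key lookup by one stable sort of specs++additions
-- by fid and a single sweep keeping the last row of each equal-fid run (objective: alternative).

-- int(row[0]) on a row of ints: the shared key of both programs (int() is the identity on Int)
def pvKey (row : List Int) : Int := PySem.List.pyGetD row 0 0

-- ===== PORT A =====
def append_feature_specs_py (specs : List (List Int)) (additions : List (List Int)) : List (List Int) :=
  -- by_fid = {int(row[0]): list(map(int, row)) for row in specs}
  let by_fid0 : PySem.Dict Int (List Int) :=
    specs.foldl (fun d row => d.insert (pvKey row) row) PySem.Dict.empty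
  -- for row in additions: by_fid[int(row[0])] = list(map(int, row))
  let by_fid : PySem.Dict Int (List Int) :=
    additions.foldl (fun d row => d.insert (pvKey row) row) by_fid0
  -- [by_fid[fid] for fid in sorted(by_fid)]  (fid is always a key, so the lookup default is dead)
  (PySem.List.sorted by_fid.keys (fun k => k) false).map (fun fid => by_fid.getD fid [])

-- ===== PORT B =====
-- the for-loop of Source B: pending = last row seen of the current equal-fid run, out = finished runs
def pvSweep (rows : List (List Int)) (pending : Option (List Int)) (out : List (List Int)) :
    List (List Int) :=
  match rows with
  | [] =>
    match pending with
    | none => out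
    | some p => out ++ [p]
  | row :: rest =>
    match pending with
    | none => pvSweep rest (some row) out
    | some p =>
      if pvKey p ≠ pvKey row then pvSweep rest (some row) (out ++ [p])
      else pvSweep rest (some row) out

def append_feature_specs_py_alt (specs : List (List Int)) (additions : List (List Int)) : List (List Int) :=
  let ordered := PySem.List.sorted (specs ++ additions) (fun row => pvKey row) false
  pvSweep ordered none []

-- ===== PRECONDITION & SPEC =====
-- Pre_ excludes exactly the inputs containing an empty row, on which Python A raises IndexError at row[0].
def Pre_append_feature_specs_py (specs : List (List Int)) (additions : List (List Int)) : Prop :=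
  (∀ r ∈ specs, r ≠ []) ∧ (∀ r ∈ additions, r ≠ [])
instance (specs : List (List Int)) (additions : List (List Int)) : Decidable (Pre_append_feature_specs_py specs additions) := by unfold Pre_append_feature_specs_py; infer_instance

def pvWitness_append_feature_specs_py : List (List Int) × List (List Int) :=
  ([[1, 10], [2, 20]], [[1, 30]])

def Spec_append_feature_specs_py (specs : List (List Int)) (additions : List (List Int)) (out : List (List Int)) : Prop := out = append_feature_specs_py_alt specs additions
instance (specs : List (List Int)) (additions : List (List Int)) (out : List (List Int)) : Decidable (Spec_append_feature_specs_py specs additions out) := by unfold Spec_append_feature_specs_py; infer_instance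

-- ===== CLAIM (what is proved, stated in full; the proofs are below) =====
def Claim_equal_append_feature_specs_py : Prop := ∀ (specs : List (List Int)) (additions : List (List Int)), Dom_append_feature_specs_py specs additions → Pre_append_feature_specs_py specs additions → Spec_append_feature_specs_py specs additions (append_feature_specs_py specs additions)

-- ===== LEMMAS AND PROOFS =====

-- the last row of l whose fid is k (the value the dict stores, and the row B's sweep keeps)
def pvLast (l : List (List Int)) (k : Int) : Option (List Int) :=
  (l.filter (fun r => decide (pvKey r = k))).getLast?

theorem pv_getLast?_cons {α : Type} (a : α) (l : List α) :
    (a :: l).getLast? = l.getLast?.or (some a) := by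
  cases h : l.getLast? with
  | none => simp [List.getLast?_cons, h]
  | some x => simp [List.getLast?_cons, h]

theorem pv_getLast?_cons_of_ne_nil {α : Type} (a : α) (l : List α) (h : l ≠ []) :
    (a :: l).getLast? = l.getLast? := by
  cases l with
  | nil => exact absurd rfl h
  | cons b m => simp [pv_getLast?_cons]

-- A's dict value: get? after the insert loop is the last matching row, else the initial dict's value
theorem pv_dict_get (l : List (List Int)) (d : PySem.Dict Int (List Int)) (k : Int) :
    (l.foldl (fun d row => d.insert (pvKey row) row) d).get? k
      = (pvLast l k).or (d.get? k) := by
  induction l generalizing d with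
  | nil => simp [pvLast]
  | cons r t ih =>
    rw [List.foldl_cons, ih]
    by_cases h : pvKey r = k
    · subst h
      have h1 : pvLast (r :: t) (pvKey r) = (pvLast t (pvKey r)).or (some r) := by
        simp [pvLast, pv_getLast?_cons]
      rw [PySem.Dict.get?_insert_self, h1, Option.or_assoc]
      simp
    · have h1 : pvLast (r :: t) k = pvLast t k := by
        simp [pvLast, h]
      rw [PySem.Dict.get?_insert_of_ne _ _ (Ne.symm h), h1]

-- keys of an insert: unchanged on overwrite, appended for a new key
theorem pv_keys_insert (d : PySem.Dict Int (List Int)) (k : Int) (v : List Int) :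
    (d.insert k v).keys = if k ∈ d.keys then d.keys else d.keys ++ [k] := by
  simp only [PySem.Dict.keys, PySem.Dict.insert, PySem.Dict.contains]
  by_cases h : k ∈ d.items.map (fun p => p.1)
  · obtain ⟨p, hp, hpk⟩ := List.mem_map.mp h
    have hc : (d.items.any fun p => p.1 == k) = true :=
      List.any_eq_true.mpr ⟨p, hp, by simp [hpk]⟩
    rw [if_pos hc, if_pos h, List.map_map]
    refine List.map_congr_left ?_
    intro q _
    by_cases hqk : q.1 = k <;> simp [Function.comp, hqk]
  · have hc : ¬ ((d.items.any fun p => p.1 == k) = true) := by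
      rw [List.any_eq_true]
      rintro ⟨q, hq, hqk⟩
      exact h (List.mem_map.mpr ⟨q, hq, by simpa using hqk⟩)
    rw [if_neg hc, if_neg h, List.map_append]
    rfl

theorem pv_keys_fold_nodup (l : List (List Int)) (d : PySem.Dict Int (List Int))
    (hd : d.keys.Nodup) :
    (l.foldl (fun d row => d.insert (pvKey row) row) d).keys.Nodup := by
  induction l generalizing d with
  | nil => exact hd
  | cons r t ih =>
    rw [List.foldl_cons]
    refine ih _ ?_
    rw [pv_keys_insert]
    split_ifs with h
    · exact hd
    · have hne : ∀ a ∈ d.keys, ¬ a = pvKey r := fun a ha hak => h (hak ▸ ha)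
      simpa [List.nodup_append] using ⟨hd, hne⟩

theorem pv_keys_fold_mem (l : List (List Int)) (d : PySem.Dict Int (List Int)) (k : Int) :
    (k ∈ (l.foldl (fun d row => d.insert (pvKey row) row) d).keys)
      ↔ k ∈ d.keys ∨ k ∈ l.map pvKey := by
  induction l generalizing d with
  | nil => simp
  | cons r t ih =>
    rw [List.foldl_cons, ih, pv_keys_insert]
    split_ifs with h
    · constructor
      · tauto
      · rintro (hk | hk)
        · tauto
        · rcases List.mem_cons.mp hk with hk | hk
          · exact Or.inl (hk ▸ h)
          · exact Or.inr (by simpa using hk)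
    · simp only [List.mem_append, List.mem_singleton, List.map_cons, List.mem_cons]
      tauto

-- stability of the insertion sort: inserting into a key-sorted list keeps, per fid, the order
theorem pv_insertBy_filter (x : List Int) (ys : List (List Int)) (c : Int)
    (hs : ys.Pairwise (fun a b => pvKey a ≤ pvKey b)) :
    (PySem.List.insertBy (fun a b => decide (pvKey a < pvKey b)) x ys).filter
        (fun r => decide (pvKey r = c))
      = if pvKey x = c then ys.filter (fun r => decide (pvKey r = c)) ++ [x]
        else ys.filter (fun r => decide (pvKey r = c)) := by
  induction ys with
  | nil => by_cases h : pvKey x = c <;> simp [PySem.List.insertBy, h]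
  | cons y t ih =>
    have hyt : ∀ z ∈ t, pvKey y ≤ pvKey z := fun z hz => (List.pairwise_cons.mp hs).1 z hz
    have ht : t.Pairwise (fun a b => pvKey a ≤ pvKey b) := (List.pairwise_cons.mp hs).2
    show (if decide (pvKey x < pvKey y) = true then x :: y :: t
        else y :: PySem.List.insertBy _ x t).filter _ = _
    by_cases hlt : pvKey x < pvKey y
    · rw [if_pos (decide_eq_true hlt)]
      by_cases hx : pvKey x = c
      · have hnil : (y :: t).filter (fun r => decide (pvKey r = c)) = [] := by
          refine List.filter_eq_nil_iff.mpr ?_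
          intro z hz
          have hyz : pvKey y ≤ pvKey z := by
            rcases List.mem_cons.mp hz with h1 | h1
            · exact h1 ▸ le_refl _
            · exact hyt z h1
          simp only [decide_eq_true_eq]
          omega
        simp [hx, hnil]
      · simp [List.filter_cons, hx]
    · rw [if_neg (by simpa using hlt), List.filter_cons, List.filter_cons, ih ht]
      by_cases hx : pvKey x = c <;> by_cases hy : pvKey y = c <;> simp [hx, hy]

theorem pv_sorted_filter (xs : List (List Int)) (c : Int) :
    (PySem.List.sorted xs (fun r => pvKey r) false).filter (fun r => decide (pvKey r = c))
      = xs.filter (fun r => decide (pvKey r = c)) := by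
  induction xs using List.reverseRecOn with
  | nil => rfl
  | append_singleton t x ih =>
    have hstep : PySem.List.sorted (t ++ [x]) (fun r => pvKey r) false
        = PySem.List.insertBy (fun a b => decide (pvKey a < pvKey b)) x
            (PySem.List.sorted t (fun r => pvKey r) false) := by
      rw [PySem.List.sorted_eq_foldl_insertBy, PySem.List.sorted_eq_foldl_insertBy,
        List.foldl_append, List.foldl_cons, List.foldl_nil]
    rw [hstep, pv_insertBy_filter _ _ _ (PySem.List.sorted_pairwise _ _), List.filter_append,
      List.filter_cons]
    by_cases hx : pvKey x = c <;> simp [hx, ih]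

-- the distinct fids of a key-sorted list, one per run
def pvDestKeys : List Int → List Int
  | [] => []
  | [k] => [k]
  | k :: k' :: t => if k' = k then pvDestKeys (k' :: t) else k :: pvDestKeys (k' :: t)

theorem pv_destKeys_mem (l : List Int) (c : Int) : c ∈ pvDestKeys l ↔ c ∈ l := by
  induction l with
  | nil => simp [pvDestKeys]
  | cons k t ih =>
    cases t with
    | nil => simp [pvDestKeys]
    | cons k' t' =>
      by_cases h : k' = k
      · rw [show pvDestKeys (k :: k' :: t') = pvDestKeys (k' :: t') from by simp [pvDestKeys, h], ih]
        subst h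
        simp only [List.mem_cons]
        tauto
      · rw [show pvDestKeys (k :: k' :: t') = k :: pvDestKeys (k' :: t') from by
          simp [pvDestKeys, h]]
        simp only [List.mem_cons, ih]

theorem pv_destKeys_pairwise (l : List Int) (hs : l.Pairwise (· ≤ ·)) :
    (pvDestKeys l).Pairwise (· < ·) := by
  induction l with
  | nil => simp [pvDestKeys]
  | cons k t ih =>
    cases t with
    | nil => simp [pvDestKeys]
    | cons k' t' =>
      have hk : ∀ z ∈ k' :: t', k ≤ z := fun z hz => (List.pairwise_cons.mp hs).1 z hz
      have ht : (k' :: t').Pairwise (· ≤ ·) := (List.pairwise_cons.mp hs).2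
      by_cases h : k' = k
      · rw [show pvDestKeys (k :: k' :: t') = pvDestKeys (k' :: t') from by simp [pvDestKeys, h]]
        exact ih ht
      · rw [show pvDestKeys (k :: k' :: t') = k :: pvDestKeys (k' :: t') from by
          simp [pvDestKeys, h]]
        refine List.pairwise_cons.mpr ⟨?_, ih ht⟩
        intro z hz
        have hklt : k < k' := lt_of_le_of_ne (hk k' (by simp)) (Ne.symm h)
        have hz' : z ∈ k' :: t' := (pv_destKeys_mem _ _).mp hz
        rcases List.mem_cons.mp hz' with h1 | h1
        · omega
        · have := (List.pairwise_cons.mp ht).1 z h1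
          omega

-- the tail-of-run view of B's sweep
def pvSweepGo (p : List Int) : List (List Int) → List (List Int)
  | [] => [p]
  | r :: t => if pvKey p ≠ pvKey r then p :: pvSweepGo r t else pvSweepGo r t

theorem pv_sweep_some (rows : List (List Int)) (p : List Int) (out : List (List Int)) :
    pvSweep rows (some p) out = out ++ pvSweepGo p rows := by
  induction rows generalizing p out with
  | nil => simp [pvSweep, pvSweepGo]
  | cons r t ih =>
    show (if pvKey p ≠ pvKey r then pvSweep t (some r) (out ++ [p]) else pvSweep t (some r) out)
        = out ++ pvSweepGo p (r :: t)
    by_cases h : pvKey p ≠ pvKey r <;> simp [h, ih, pvSweepGo]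

-- over a key-sorted list, the sweep returns the last row of each run, one per distinct fid
theorem pv_go (t : List (List Int)) (r : List Int)
    (hs : (r :: t).Pairwise (fun a b => pvKey a ≤ pvKey b)) :
    pvSweepGo r t
      = (pvDestKeys ((r :: t).map pvKey)).map (fun c => (pvLast (r :: t) c).getD []) := by
  induction t generalizing r with
  | nil =>
    simp [pvSweepGo, pvDestKeys, pvLast, List.filter_cons]
  | cons r' t' ih =>
    have hk : ∀ z ∈ r' :: t', pvKey r ≤ pvKey z := fun z hz => (List.pairwise_cons.mp hs).1 z hz
    have ht : (r' :: t').Pairwise (fun a b => pvKey a ≤ pvKey b) := (List.pairwise_cons.mp hs).2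
    by_cases h : pvKey r' = pvKey r
    · -- r and r' share a fid: r is superseded by a later row of the same run
      rw [show pvSweepGo r (r' :: t') = pvSweepGo r' t' from by simp [pvSweepGo, h],
        show pvDestKeys ((r :: r' :: t').map pvKey) = pvDestKeys ((r' :: t').map pvKey) from by
          simp [pvDestKeys, h], ih _ ht]
      refine List.map_congr_left ?_
      intro c hc
      have hc' : c ∈ (r' :: t').map pvKey := (pv_destKeys_mem _ _).mp hc
      congr 1
      by_cases hrc : pvKey r = c
      · have hfil : r' ∈ (r' :: t').filter (fun z => decide (pvKey z = c)) := by
          simp [h, hrc]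
        have hne : (r' :: t').filter (fun z => decide (pvKey z = c)) ≠ [] :=
          fun hnil => by simp [hnil] at hfil
        have heq : pvLast (r :: r' :: t') c = pvLast (r' :: t') c := by
          simp only [pvLast]
          conv_lhs => rw [List.filter_cons]
          rw [if_pos (by simp [hrc])]
          exact pv_getLast?_cons_of_ne_nil _ _ hne
        exact heq.symm
      · simp [pvLast, List.filter_cons, hrc]
    · -- a new, strictly larger fid starts at r'
      have hlt : pvKey r < pvKey r' := lt_of_le_of_ne (hk r' (by simp)) (fun e => h e.symm)
      have hgt : ∀ z ∈ r' :: t', pvKey r < pvKey z := by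
        intro z hz
        rcases List.mem_cons.mp hz with h1 | h1
        · exact h1 ▸ hlt
        · have := (List.pairwise_cons.mp ht).1 z h1
          omega
      have hne' : pvKey r ≠ pvKey r' := fun e => h e.symm
      rw [show pvSweepGo r (r' :: t') = r :: pvSweepGo r' t' from by simp [pvSweepGo, hne'],
        show pvDestKeys ((r :: r' :: t').map pvKey) = pvKey r :: pvDestKeys ((r' :: t').map pvKey)
          from by simp [pvDestKeys, h], ih _ ht, List.map_cons]
      congr 1
      · -- head: the run of pvKey r is the singleton [r]
        have hnil : (r' :: t').filter (fun z => decide (pvKey z = pvKey r)) = [] := by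
          refine List.filter_eq_nil_iff.mpr ?_
          intro z hz
          have := hgt z hz
          simp only [decide_eq_true_eq]
          omega
        simp [pvLast, hnil]
      · -- tail: r contributes to no later fid
        refine List.map_congr_left ?_
        intro c hc
        have hc' : c ∈ (r' :: t').map pvKey := (pv_destKeys_mem _ _).mp hc
        obtain ⟨z, hz, hzc⟩ := List.mem_map.mp hc'
        have hrc : ¬ (pvKey r = c) := by
          have := hgt z hz
          omega
        simp [pvLast, List.filter_cons, hrc]

theorem pv_group (s : List (List Int)) (hs : s.Pairwise (fun a b => pvKey a ≤ pvKey b)) :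
    pvSweep s none [] = (pvDestKeys (s.map pvKey)).map (fun c => (pvLast s c).getD []) := by
  cases s with
  | nil => simp [pvSweep, pvDestKeys]
  | cons r t =>
    show pvSweep t (some r) [] = _
    rw [pv_sweep_some, List.nil_append, pv_go t r hs]

-- ===== VERDICT (by name: the statement is the Claim_ definition above) =====
theorem append_feature_specs_py_spec : Claim_equal_append_feature_specs_py := by
  intro specs additions _ _
  show append_feature_specs_py specs additions = append_feature_specs_py_alt specs additions
  unfold append_feature_specs_py append_feature_specs_py_alt
  dsimp only
  rw [← List.foldl_append]
  set l := specs ++ additions with hl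
  set d := l.foldl (fun d row => d.insert (pvKey row) row) PySem.Dict.empty with hd
  set s := PySem.List.sorted l (fun row => pvKey row) false with hsrt
  have hpair : s.Pairwise (fun a b => pvKey a ≤ pvKey b) := PySem.List.sorted_pairwise _ _
  have hkeys : PySem.List.sorted d.keys (fun k => k) false = pvDestKeys (s.map pvKey) := by
    refine PySem.List.sorted_eq_of_perm_of_pairwise_lt d.keys (pvDestKeys (s.map pvKey)) (fun k => k) ?_ ?_
    · refine (List.perm_ext_iff_of_nodup ?_ ?_).mpr ?_
      · exact (pv_destKeys_pairwise _ ((List.pairwise_map).mpr hpair)).imp ne_of_lt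
      · exact pv_keys_fold_nodup l _ (by simp [PySem.Dict.keys, PySem.Dict.empty])
      · intro c
        rw [pv_destKeys_mem, pv_keys_fold_mem]
        have hmem : c ∈ s.map pvKey ↔ c ∈ l.map pvKey :=
          ((PySem.List.sorted_perm _ _ _).map pvKey).mem_iff
        rw [hmem]
        simp [PySem.Dict.keys, PySem.Dict.empty]
    · exact pv_destKeys_pairwise _ ((List.pairwise_map).mpr hpair)
  rw [pv_group s hpair, hkeys]
  refine List.map_congr_left ?_
  intro c _
  have hget : d.get? c = pvLast l c := by
    rw [hd, pv_dict_get]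
    show (pvLast l c).or none = pvLast l c
    exact Option.or_none
  have hlast : pvLast s c = pvLast l c := by
    simp only [pvLast]
    rw [hsrt, pv_sorted_filter]
  rw [PySem.Dict.getD, hget, hlast]
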